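-- pv_equiv track=rewrite | github.com/NaveenNS07/project | lab program 9(25-06-2024)/generate maximum local.py | generate_max_local
-- ===== SOURCE A (Python) =====
-- def generate_max_local(grid):
--     n = len(grid)
--     max_local = [[0] * (n - 2) for _ in range(n - 2)]
--
--     for i in range(n - 2):
--         for j in range(n - 2):
--             submatrix = [grid[x][j:j+3] for x in range(i, i+3)]
--             max_local[i][j] = max([max(row) for row in submatrix])
--
--     return max_local
-- ===== SOURCE B (Python) =====
-- def generate_max_local(grid):
--     n = len(grid)
--     k = n - 2
--     if k <= 0:
--         return []
--     # separable max: horizontal 3-window row maxima once per row, then vertical max of 3 table rows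
--     row_max = [[max(row[j:j+3]) for j in range(k)] for row in grid]
--     return [[max(row_max[i][j], row_max[i + 1][j], row_max[i + 2][j])
--              for j in range(k)]
--             for i in range(k)]
-- ===== Notes on version B (the rewrite author's own statement) =====
-- stated objective: faster
-- what changed: B replaces the per-window recomputation over 3x3 submatrices by a separable two-pass scheme: a horizontal 3-window row-max table computed once, then each output cell is the max of three table entries.
import Mathlib
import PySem

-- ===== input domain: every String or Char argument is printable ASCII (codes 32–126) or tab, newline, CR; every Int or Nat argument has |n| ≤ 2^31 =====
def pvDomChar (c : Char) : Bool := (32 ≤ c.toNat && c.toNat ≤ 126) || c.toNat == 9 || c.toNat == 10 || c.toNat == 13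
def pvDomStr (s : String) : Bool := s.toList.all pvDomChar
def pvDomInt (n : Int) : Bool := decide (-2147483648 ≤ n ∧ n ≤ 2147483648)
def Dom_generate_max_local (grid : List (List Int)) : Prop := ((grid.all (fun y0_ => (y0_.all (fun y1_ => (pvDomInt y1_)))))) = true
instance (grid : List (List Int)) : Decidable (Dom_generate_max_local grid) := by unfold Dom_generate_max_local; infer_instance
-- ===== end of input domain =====

-- B computes the same 3x3 window maxima via a row-max table (separable max) instead of
-- rebuilding each 3x3 submatrix; equality of return values is proved on Pre_.

-- ===== PORT A =====
def generate_max_local (grid : List (List Int)) : List (List Int) :=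
  let n : Int := (grid.length : Int)
  (PySem.List.pyRange 0 (n - 2) 1).map (fun i =>
    (PySem.List.pyRange 0 (n - 2) 1).map (fun j =>
      let submatrix := (PySem.List.pyRange i (i + 3) 1).map (fun x =>
        PySem.List.slice (PySem.List.pyGetD grid x []) (some j) (some (j + 3)))
      -- max(row) raises on an empty slice; Pre_ excludes that, so getD 0 is never the result
      (PySem.List.max? (submatrix.map (fun row =>
        (PySem.List.max? row (fun y => y)).getD 0)) (fun y => y)).getD 0))

-- ===== PORT B =====
def generate_max_local_alt (grid : List (List Int)) : List (List Int) :=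
  let n : Int := (grid.length : Int)
  let k : Int := n - 2
  if k ≤ 0 then []
  else
    let row_max := grid.map (fun row =>
      (PySem.List.pyRange 0 k 1).map (fun j =>
        (PySem.List.max? (PySem.List.slice row (some j) (some (j + 3))) (fun y => y)).getD 0))
    (PySem.List.pyRange 0 k 1).map (fun i =>
      (PySem.List.pyRange 0 k 1).map (fun j =>
        max (max (PySem.List.pyGetD (PySem.List.pyGetD row_max i []) j 0)
                 (PySem.List.pyGetD (PySem.List.pyGetD row_max (i + 1) []) j 0))
            (PySem.List.pyGetD (PySem.List.pyGetD row_max (i + 2) []) j 0)))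

-- ===== PRECONDITION & SPEC =====
-- Pre_ excludes exactly the ragged grids on which Python A raises ValueError:
-- n ≥ 3 and some row shorter than n-2 makes a slice grid[x][j:j+3] empty, and Python max of an empty sequence raises.
def Pre_generate_max_local (grid : List (List Int)) : Prop :=
  (grid.length : Int) < 3 ∨ ∀ row ∈ grid, (grid.length : Int) - 2 ≤ (row.length : Int)
instance (grid : List (List Int)) : Decidable (Pre_generate_max_local grid) := by
  unfold Pre_generate_max_local; infer_instance

def pvWitness_generate_max_local : List (List Int) := [[1,2,3],[4,5,6],[7,8,9]]

def Spec_generate_max_local (grid : List (List Int)) (out : List (List Int)) : Prop := out = generate_max_local_alt grid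
instance (grid : List (List Int)) (out : List (List Int)) : Decidable (Spec_generate_max_local grid out) := by unfold Spec_generate_max_local; infer_instance

-- ===== CLAIM (what is proved, stated in full; the proofs are below) =====
def Claim_equal_generate_max_local : Prop := ∀ (grid : List (List Int)), Dom_generate_max_local grid → Pre_generate_max_local grid → Spec_generate_max_local grid (generate_max_local grid)

-- ===== LEMMAS AND PROOFS =====
-- row_max table lookup: row_max[x][j] is the horizontal 3-window max of grid[x] at j
lemma rm_get (grid : List (List Int)) (k x j : Int)
    (hx0 : 0 ≤ x) (hx : x < (grid.length : Int)) (hj0 : 0 ≤ j) (hj : j < k) :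
    PySem.List.pyGetD (PySem.List.pyGetD (grid.map (fun row =>
        (PySem.List.pyRange 0 k 1).map (fun j =>
          (PySem.List.max? (PySem.List.slice row (some j) (some (j + 3))) (fun y => y)).getD 0))) x []) j 0
    = (PySem.List.max? (PySem.List.slice (PySem.List.pyGetD grid x []) (some j) (some (j + 3))) (fun y => y)).getD 0 := by
  rw [PySem.List.pyGetD_eq_getElem _ _ hx0 (by simpa using hx),
      PySem.List.pyGetD_eq_getElem _ _ hx0 (by simpa using hx)]
  rw [List.getElem_map]
  rw [PySem.List.pyGetD_map_pyRange_of_nonneg _ _ _ _ hj0 hj]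

-- the two ports agree cell by cell (in fact on every input)
lemma ports_eq (grid : List (List Int)) :
    generate_max_local grid = generate_max_local_alt grid := by
  unfold generate_max_local generate_max_local_alt
  set n : Int := (grid.length : Int) with hn
  by_cases hk : n - 2 ≤ 0
  · simp [PySem.List.pyRange_one_eq_nil (by omega : n - 2 ≤ 0), hk]
  · simp only [if_neg hk]
    apply List.map_congr_left
    intro i hi
    rw [PySem.List.mem_pyRange_one] at hi
    apply List.map_congr_left
    intro j hj
    rw [PySem.List.mem_pyRange_one] at hj
    rw [PySem.List.pyRange_one_cons (by omega : i < i + 3),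
        PySem.List.pyRange_one_cons (by omega : i + 1 < i + 3),
        PySem.List.pyRange_one_cons (by omega : i + 1 + 1 < i + 3),
        PySem.List.pyRange_one_eq_nil (by omega : i + 3 ≤ i + 1 + 1 + 1)]
    simp only [List.map_cons, List.map_nil, PySem.List.max?_id_cons, List.foldl, Option.getD_some]
    rw [rm_get grid (n-2) i j (by omega) (by omega) hj.1 hj.2,
        rm_get grid (n-2) (i+1) j (by omega) (by omega) hj.1 hj.2,
        rm_get grid (n-2) (i+2) j (by omega) (by omega) hj.1 hj.2]
    rw [show i + 1 + 1 = i + 2 by ring]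

-- ===== VERDICT (by name: the statement is the Claim_ definition above) =====
theorem generate_max_local_spec : Claim_equal_generate_max_local := by
  intro grid _ _
  unfold Spec_generate_max_local
  exact ports_eq grid
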